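-- pv_equiv track=rewrite | github.com/pkolachi/corpus-preprocessing | scripts/conll_utils.py | constparse_chunks
-- ===== SOURCE A (Python) =====
-- def constparse_chunks(const_repr):
--   quote, paren = False, False;
--   terminalIndices = [];
--   start_idx, end_idx = 0, 0;
--   for idx, ch in enumerate(const_repr):
--     if ch == '(':
--       if not quote:
--         start_idx = idx;
--         paren = True;
--     elif ch == ')':
--       if (not quote) and paren:
--         end_idx = idx+1;
--         terminalIndices.append( (start_idx, end_idx) );
--         paren = False;
--     elif ch == '"':
--       quote = not quote;
--   cur_idx = 0;
--   for terminalIdx in terminalIndices: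
--     start_idx, end_idx = terminalIdx;
--     terminal_repr = const_repr[start_idx:end_idx];
--     for ch in const_repr[end_idx:]:
--       if ch == ')':
--         end_idx += 1;
--       else:
--         break;
--     yield const_repr[cur_idx:end_idx].replace(terminal_repr, '*').strip().replace(' ', '_');
--     cur_idx = end_idx;
-- ===== SOURCE B (Python) =====
-- def constparse_chunks(const_repr):
--   # Single index-based scan: no terminalIndices list, no second pass.
--   n = len(const_repr)
--   quote = False
--   open_paren = False
--   last_open = 0
--   cur = 0
--   i = 0
--   while i < n:
--     ch = const_repr[i]
--     if ch == '"':
--       quote = not quote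
--       i += 1
--     elif ch == '(' and not quote:
--       last_open = i
--       open_paren = True
--       i += 1
--     elif ch == ')' and not quote and open_paren:
--       end = i + 1
--       while end < n and const_repr[end] == ')':
--         end += 1
--       terminal = const_repr[last_open:i + 1]
--       yield const_repr[cur:end].replace(terminal, '*').strip().replace(' ', '_')
--       cur = end
--       open_paren = False
--       i = end
--     else:
--       i += 1
-- ===== Notes on version B (the rewrite author's own statement) =====
-- stated objective: alternative
-- what changed: replaced the build-terminalIndices-list-then-second-pass structure by a single index-based scan that yields each chunk as soon as its unquoted closing paren (plus absorbed trailing parens) is found, eliminating the intermediate list and the second pass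
import Mathlib
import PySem

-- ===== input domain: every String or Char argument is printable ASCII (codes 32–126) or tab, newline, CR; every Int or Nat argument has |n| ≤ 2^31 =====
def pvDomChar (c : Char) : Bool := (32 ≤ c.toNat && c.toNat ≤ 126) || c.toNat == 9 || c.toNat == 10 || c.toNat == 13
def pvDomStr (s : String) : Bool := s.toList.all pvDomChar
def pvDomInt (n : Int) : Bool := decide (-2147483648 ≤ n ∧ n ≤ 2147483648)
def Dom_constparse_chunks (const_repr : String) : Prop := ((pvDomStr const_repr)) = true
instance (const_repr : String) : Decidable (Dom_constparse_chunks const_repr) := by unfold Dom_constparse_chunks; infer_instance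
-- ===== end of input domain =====

-- B replaces A's two-pass (collect terminal index pairs, then slice/yield) by a single
-- index-based scan that emits each chunk as soon as its terminal closes (objective: alternative).

-- ===== PORT A =====
-- first loop: for idx, ch in enumerate(const_repr) with state (quote, paren, terminalIndices, start_idx)
def aPass1 : List Char → Nat → Bool → Bool → List (Nat × Nat) → Nat → List (Nat × Nat)
  | [], _, _, _, tis, _ => tis
  | ch :: tl, idx, quote, paren, tis, start =>
    if ch = '(' then
      if !quote then aPass1 tl (idx + 1) quote true tis idx
      else aPass1 tl (idx + 1) quote paren tis start
    else if ch = ')' then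
      if !quote && paren then aPass1 tl (idx + 1) quote false (tis ++ [(start, idx + 1)]) start
      else aPass1 tl (idx + 1) quote paren tis start
    else if ch = '"' then aPass1 tl (idx + 1) (!quote) paren tis start
    else aPass1 tl (idx + 1) quote paren tis start

-- inner loop: for ch in const_repr[end_idx:]: if ch == ')': end_idx += 1 else break
def aAbsorb : List Char → Nat → Nat
  | [], e => e
  | ch :: tl, e => if ch = ')' then aAbsorb tl (e + 1) else e

-- second loop: for terminalIdx in terminalIndices (yields collected into a list)
def aPass2 (s : String) : List (Nat × Nat) → Nat → List String
  | [], _ => []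
  | (start, e) :: tl, cur =>
    let terminal := PySem.Str.slice s (some ((start : Nat) : Int)) (some ((e : Nat) : Int))
    let e' := aAbsorb (PySem.Str.slice s (some ((e : Nat) : Int)) none).toList e
    PySem.Str.replace
      (PySem.Str.strip
        (PySem.Str.replace (PySem.Str.slice s (some ((cur : Nat) : Int)) (some ((e' : Nat) : Int))) terminal "*"))
      " " "_"
      :: aPass2 s tl e'

def constparse_chunks (const_repr : String) : List String :=
  aPass2 const_repr (aPass1 const_repr.toList 0 false false [] 0) 0

-- ===== PORT B =====
-- inner while: while end < n and const_repr[end] == ')': end += 1  (count of absorbed parens)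
def bCount : List Char → Nat
  | [] => 0
  | ch :: tl => if ch = ')' then bCount tl + 1 else 0

-- the single while-loop of Source B, recursing on the remaining characters
def bLoop (s : String) (l : List Char) (i : Nat) (quote openp : Bool) (lastOpen cur : Nat) :
    List String :=
  match l with
  | [] => []
  | ch :: tl =>
    if ch = '"' then bLoop s tl (i + 1) (!quote) openp lastOpen cur
    else if ch = '(' && !quote then bLoop s tl (i + 1) quote true i cur
    else if ch = ')' && !quote && openp then
      let e := i + 1 + bCount tl
      let terminal := PySem.Str.slice s (some ((lastOpen : Nat) : Int)) (some ((i + 1 : Nat) : Int))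
      PySem.Str.replace
        (PySem.Str.strip
          (PySem.Str.replace (PySem.Str.slice s (some ((cur : Nat) : Int)) (some ((e : Nat) : Int))) terminal "*"))
        " " "_"
        :: bLoop s (tl.drop (bCount tl)) e quote false lastOpen e
    else bLoop s tl (i + 1) quote openp lastOpen cur
termination_by l.length
decreasing_by
  all_goals simp only [List.length_drop, List.length_cons]
  all_goals omega

def constparse_chunks_alt (const_repr : String) : List String :=
  bLoop const_repr const_repr.toList 0 false false 0 0

-- ===== PRECONDITION & SPEC =====
def Spec_constparse_chunks (const_repr : String) (out : List String) : Prop := out = constparse_chunks_alt const_repr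
instance (const_repr : String) (out : List String) : Decidable (Spec_constparse_chunks const_repr out) := by unfold Spec_constparse_chunks; infer_instance

-- ===== CLAIM (what is proved, stated in full; the proofs are below) =====
def Claim_equal_constparse_chunks : Prop := ∀ (const_repr : String), Dom_constparse_chunks const_repr → Spec_constparse_chunks const_repr (constparse_chunks const_repr)

-- ===== LEMMAS AND PROOFS =====

theorem bLoop_nil (s : String) (i : Nat) (quote openp : Bool) (lo cur : Nat) :
    bLoop s [] i quote openp lo cur = [] := by
  rw [bLoop.eq_def]

theorem bLoop_cons (s : String) (ch : Char) (tl : List Char) (i : Nat)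
    (quote openp : Bool) (lo cur : Nat) :
    bLoop s (ch :: tl) i quote openp lo cur =
      if ch = '"' then bLoop s tl (i + 1) (!quote) openp lo cur
      else if ch = '(' && !quote then bLoop s tl (i + 1) quote true i cur
      else if ch = ')' && !quote && openp then
        PySem.Str.replace
          (PySem.Str.strip
            (PySem.Str.replace
              (PySem.Str.slice s (some ((cur : Nat) : Int)) (some ((i + 1 + bCount tl : Nat) : Int)))
              (PySem.Str.slice s (some ((lo : Nat) : Int)) (some ((i + 1 : Nat) : Int))) "*"))
          " " "_"
          :: bLoop s (tl.drop (bCount tl)) (i + 1 + bCount tl) quote false lo (i + 1 + bCount tl)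
      else bLoop s tl (i + 1) quote openp lo cur := by
  rw [bLoop.eq_def]

-- the accumulator of aPass1 is only ever appended to
theorem aPass1_append (l : List Char) : ∀ (idx : Nat) (quote paren : Bool)
    (tis : List (Nat × Nat)) (start : Nat),
    aPass1 l idx quote paren tis start = tis ++ aPass1 l idx quote paren [] start := by
  induction l with
  | nil => intro idx quote paren tis start; simp [aPass1]
  | cons ch tl ih =>
    intro idx quote paren tis start
    simp only [aPass1, List.nil_append]
    split_ifs with h1 h2 h1 h3 h1
    · rw [ih (idx + 1) quote true tis idx, ih (idx + 1) quote true [] idx]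
    · rw [ih (idx + 1) quote paren tis start, ih (idx + 1) quote paren [] start]
    · rw [ih (idx + 1) quote false (tis ++ [(start, idx + 1)]) start,
        ih (idx + 1) quote false [(start, idx + 1)] start]
      simp
    · rw [ih (idx + 1) quote paren tis start, ih (idx + 1) quote paren [] start]
    · rw [ih (idx + 1) (!quote) paren tis start, ih (idx + 1) (!quote) paren [] start]
    · rw [ih (idx + 1) quote paren tis start, ih (idx + 1) quote paren [] start]

theorem aAbsorb_eq (l : List Char) : ∀ e : Nat, aAbsorb l e = e + bCount l := by
  induction l with
  | nil => intro e; simp [aAbsorb, bCount]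
  | cons ch tl ih =>
    intro e
    simp only [aAbsorb, bCount]
    split_ifs with h
    · rw [ih]; omega
    · omega

-- scanning the run of ')' characters with quote = paren = false changes nothing in pass 1
theorem aPass1_skip (l : List Char) : ∀ (i lo : Nat),
    aPass1 l i false false [] lo
      = aPass1 (l.drop (bCount l)) (i + bCount l) false false [] lo := by
  induction l with
  | nil => intro i lo; simp [bCount]
  | cons ch tl ih =>
    intro i lo
    by_cases h : ch = ')'
    · subst h
      rw [show bCount (')' :: tl) = bCount tl + 1 from by simp [bCount]]
      rw [show aPass1 (')' :: tl) i false false [] lo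
            = aPass1 tl (i + 1) false false [] lo from by simp [aPass1]]
      rw [ih (i + 1) lo]
      rw [show (')' :: tl).drop (bCount tl + 1) = tl.drop (bCount tl) from rfl]
      ring_nf
    · rw [show bCount (ch :: tl) = 0 from by simp [bCount, h]]
      simp

theorem drop_succ_of_cons {s : List Char} {i : Nat} {ch : Char} {tl : List Char}
    (h : s.drop i = ch :: tl) : s.drop (i + 1) = tl := by
  rw [← List.drop_drop, h, List.drop_one, List.tail_cons]

theorem bLoop_eq_aPass2 (s : String) : ∀ (n : Nat) (l : List Char) (i : Nat)
    (quote openp : Bool) (lo cur : Nat),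
    l.length ≤ n → l = s.toList.drop i →
    bLoop s l i quote openp lo cur = aPass2 s (aPass1 l i quote openp [] lo) cur := by
  intro n
  induction n with
  | zero =>
    intro l i quote openp lo cur hlen _
    have hnil : l = [] := List.eq_nil_of_length_eq_zero (Nat.le_zero.mp hlen)
    subst hnil
    rw [bLoop_nil]; simp [aPass1, aPass2]
  | succ n ih =>
    intro l i quote openp lo cur hlen hdrop
    match l with
    | [] => rw [bLoop_nil]; simp [aPass1, aPass2]
    | ch :: tl =>
      have htl : s.toList.drop (i + 1) = tl := drop_succ_of_cons hdrop.symm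
      have hlen' : tl.length ≤ n := by
        simp only [List.length_cons] at hlen; omega
      rw [bLoop_cons]
      by_cases hq : ch = '"'
      · subst hq
        rw [if_pos rfl]
        rw [show aPass1 ('"' :: tl) i quote openp [] lo
              = aPass1 tl (i + 1) (!quote) openp [] lo from by simp [aPass1]]
        exact ih tl (i + 1) (!quote) openp lo cur hlen' htl.symm
      · rw [if_neg hq]
        by_cases hp : ch = '('
        · subst hp
          cases quote with
          | false =>
            rw [if_pos (by simp)]
            rw [show aPass1 ('(' :: tl) i false openp [] lo
                  = aPass1 tl (i + 1) false true [] i from by simp [aPass1]]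
            exact ih tl (i + 1) false true i cur hlen' htl.symm
          | true =>
            rw [if_neg (by simp), if_neg (by simp)]
            rw [show aPass1 ('(' :: tl) i true openp [] lo
                  = aPass1 tl (i + 1) true openp [] lo from by simp [aPass1]]
            exact ih tl (i + 1) true openp lo cur hlen' htl.symm
        · by_cases hc : ch = ')'
          · subst hc
            rw [if_neg (by simp [hp])]
            cases quote with
            | true =>
              rw [if_neg (by simp)]
              rw [show aPass1 (')' :: tl) i true openp [] lo
                    = aPass1 tl (i + 1) true openp [] lo from by simp [aPass1]]
              exact ih tl (i + 1) true openp lo cur hlen' htl.symm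
            | false =>
              cases openp with
              | false =>
                rw [if_neg (by simp)]
                rw [show aPass1 (')' :: tl) i false false [] lo
                      = aPass1 tl (i + 1) false false [] lo from by simp [aPass1]]
                exact ih tl (i + 1) false false lo cur hlen' htl.symm
              | true =>
                rw [if_pos (by simp)]
                rw [show aPass1 (')' :: tl) i false true [] lo
                      = aPass1 tl (i + 1) false false [(lo, i + 1)] lo from by simp [aPass1]]
                rw [aPass1_append tl (i + 1) false false [(lo, i + 1)] lo]
                rw [show ((([(lo, i + 1)] : List (Nat × Nat)))
                        ++ aPass1 tl (i + 1) false false [] lo)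
                      = (lo, i + 1) :: aPass1 tl (i + 1) false false [] lo from by simp]
                simp only [aPass2]
                have hsl : (PySem.Str.slice s (some ((i + 1 : Nat) : Int)) none).toList = tl := by
                  rw [PySem.Str.toList_slice, PySem.Chars.slice_eq_listSlice,
                    PySem.List.slice_from_natCast, htl]
                rw [hsl, aAbsorb_eq tl (i + 1)]
                congr 1
                rw [aPass1_skip tl (i + 1) lo]
                have hdd : tl.drop (bCount tl) = s.toList.drop (i + 1 + bCount tl) := by
                  rw [← List.drop_drop, htl]
                have hlen'' : (tl.drop (bCount tl)).length ≤ n := by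
                  simp only [List.length_drop]; omega
                exact ih (tl.drop (bCount tl)) (i + 1 + bCount tl) false false lo
                  (i + 1 + bCount tl) hlen'' hdd
          · rw [if_neg (by simp [hp]), if_neg (by simp [hc])]
            rw [show aPass1 (ch :: tl) i quote openp [] lo
                  = aPass1 tl (i + 1) quote openp [] lo from by simp [aPass1, hq, hp, hc]]
            exact ih tl (i + 1) quote openp lo cur hlen' htl.symm

-- ===== VERDICT (by name: the statement is the Claim_ definition above) =====
theorem constparse_chunks_spec : Claim_equal_constparse_chunks := by
  intro s _
  unfold Spec_constparse_chunks constparse_chunks constparse_chunks_alt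
  exact (bLoop_eq_aPass2 s s.toList.length s.toList 0 false false 0 0 le_rfl (by simp)).symm
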